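-- pv_equiv track=rewrite | github.com/vinayChauhan123/VigilantMed-App | ML/Utility/utils.py | fill_diagnosis
-- ===== SOURCE A (Python) =====
-- def fill_diagnosis(data):
--     diagnosis_mapping = {
--         "Alzheimer": "ChronicCond_Alzheimer",
--         "HeartDisease": "ChronicCond_Heartfailure",
--         "KidneyDisease": "ChronicCond_KidneyDisease",
--         "Cancer": "ChronicCond_Cancer",
--         "Obstructive PulmonaryDisease": "ChronicCond_ObstrPulmonary",
--         "Depression": "ChronicCond_Depression",
--         "Diabetes": "ChronicCond_Diabetes",
--         "IschemicHeart": "ChronicCond_IschemicHeart",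
--         "Osteoporosis": "ChronicCond_Osteoporasis",
--         "Other": "ChronicCond_rheumatoidarthritis", # Assuming 'Other' as rheumatoidarthritis
--     }
--
--     # Initialize all diagnosis as False (0)
--     diagnosis_map = {key: 0 for key in diagnosis_mapping.values()}
--
--     # Set True (1) for matching diagnoses
--     for diag in data.get('diagnosis', []):
--         for key, value in diag.items():
--             mapped_key = diagnosis_mapping.get(key)
--             if value and mapped_key:
--                 diagnosis_map[mapped_key] = 1
--
--     return diagnosis_map
-- ===== SOURCE B (Python) =====
-- def fill_diagnosis(data):
--     diagnosis_mapping = {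
--         "Alzheimer": "ChronicCond_Alzheimer",
--         "HeartDisease": "ChronicCond_Heartfailure",
--         "KidneyDisease": "ChronicCond_KidneyDisease",
--         "Cancer": "ChronicCond_Cancer",
--         "Obstructive PulmonaryDisease": "ChronicCond_ObstrPulmonary",
--         "Depression": "ChronicCond_Depression",
--         "Diabetes": "ChronicCond_Diabetes",
--         "IschemicHeart": "ChronicCond_IschemicHeart",
--         "Osteoporosis": "ChronicCond_Osteoporasis",
--         "Other": "ChronicCond_rheumatoidarthritis",
--     }
--     records = data.get('diagnosis', [])
--     # mapping-driven: for each chronic-condition flag, scan the records for a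
--     # truthy occurrence of its source key (early exit via any); no marking pass.
--     return {target: int(any(v for diag in records for k, v in diag.items() if k == src))
--             for src, target in diagnosis_mapping.items()}
-- ===== Notes on version B (the rewrite author's own statement) =====
-- stated objective: alternative
-- what changed: B inverts the loop nesting: instead of one pass over the records mutating an initialized all-zero dict via mapping lookups, B iterates over the fixed mapping and, per condition, scans the records with an early-exiting any() for a truthy occurrence of that source key; no output dict is initialized or mutated and no mapping lookup occurs.
import Mathlib
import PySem

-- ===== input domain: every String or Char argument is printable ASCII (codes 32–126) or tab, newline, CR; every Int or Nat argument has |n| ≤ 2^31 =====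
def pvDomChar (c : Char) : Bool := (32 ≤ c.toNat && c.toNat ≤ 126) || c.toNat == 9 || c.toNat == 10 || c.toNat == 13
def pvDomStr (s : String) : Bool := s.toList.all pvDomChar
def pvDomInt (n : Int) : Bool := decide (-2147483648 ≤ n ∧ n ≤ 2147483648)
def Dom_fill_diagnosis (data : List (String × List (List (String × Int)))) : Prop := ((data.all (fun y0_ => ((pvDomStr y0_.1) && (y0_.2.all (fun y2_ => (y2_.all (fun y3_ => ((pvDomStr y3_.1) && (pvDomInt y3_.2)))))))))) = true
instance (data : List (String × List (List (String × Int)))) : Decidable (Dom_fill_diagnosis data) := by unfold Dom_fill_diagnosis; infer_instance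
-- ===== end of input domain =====

-- B inverts the loops: per mapping entry it scans the records for a truthy occurrence of that key (early-exit any), instead of A's single pass mutating an all-zero dict. Same value, different decomposition.

-- the fixed diagnosis_mapping literal (shared data of both ports)
def pvDiagnosisMapping : List (String × String) :=
  [("Alzheimer", "ChronicCond_Alzheimer"),
   ("HeartDisease", "ChronicCond_Heartfailure"),
   ("KidneyDisease", "ChronicCond_KidneyDisease"),
   ("Cancer", "ChronicCond_Cancer"),
   ("Obstructive PulmonaryDisease", "ChronicCond_ObstrPulmonary"),
   ("Depression", "ChronicCond_Depression"),
   ("Diabetes", "ChronicCond_Diabetes"),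
   ("IschemicHeart", "ChronicCond_IschemicHeart"),
   ("Osteoporosis", "ChronicCond_Osteoporasis"),
   ("Other", "ChronicCond_rheumatoidarthritis")]

-- ===== PORT A =====
def fill_diagnosis (data : List (String × List (List (String × Int)))) : List (String × Int) :=
  let mapping : PySem.Dict String String := PySem.Dict.mk pvDiagnosisMapping
  -- diagnosis_map = {key: 0 for key in diagnosis_mapping.values()}
  let init : PySem.Dict String Int :=
    (pvDiagnosisMapping.map (·.2)).foldl (fun d k => d.insert k 0) PySem.Dict.empty
  -- for diag in data.get('diagnosis', []): for key, value in diag.items(): …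
  let final :=
    (PySem.Dict.getD (PySem.Dict.mk data) "diagnosis" []).foldl
      (fun (d : PySem.Dict String Int) (diag : List (String × Int)) =>
        diag.foldl
          (fun d kv =>
            match mapping.get? kv.1 with
            | some m => if kv.2 ≠ (0 : Int) then d.insert m 1 else d
            | none => d)
          d)
      init
  final.items

-- ===== PORT B =====
def fill_diagnosis_alt (data : List (String × List (List (String × Int)))) : List (String × Int) :=
  -- records = data.get('diagnosis', [])
  let records := PySem.Dict.getD (PySem.Dict.mk data) "diagnosis" []
  -- {target: int(any(v for diag in records for k, v in diag.items() if k == src)) for src, target in diagnosis_mapping.items()}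
  pvDiagnosisMapping.map (fun p =>
    (p.2, if records.any (fun diag => diag.any (fun kv => kv.1 == p.1 && kv.2 != 0)) then (1 : Int) else 0))

-- ===== PRECONDITION & SPEC =====
def Spec_fill_diagnosis (data : List (String × List (List (String × Int)))) (out : List (String × Int)) : Prop := out = fill_diagnosis_alt data
instance (data : List (String × List (List (String × Int)))) (out : List (String × Int)) : Decidable (Spec_fill_diagnosis data out) := by unfold Spec_fill_diagnosis; infer_instance

-- ===== CLAIM (what is proved, stated in full; the proofs are below) =====
def Claim_equal_fill_diagnosis : Prop := ∀ (data : List (String × List (List (String × Int)))), Dom_fill_diagnosis data → Spec_fill_diagnosis data (fill_diagnosis data)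

-- ===== LEMMAS AND PROOFS =====

-- the dict A maintains, expressed as a function of the set of active flags seen so far
def pvF (s : PySem.Set String) : PySem.Dict String Int :=
  PySem.Dict.mk (pvDiagnosisMapping.map (fun p => (p.2, if PySem.Set.contains s p.1 then (1 : Int) else 0)))

lemma pv_contains_add (s : List String) (x y : String) :
    PySem.Set.contains (PySem.Set.add s x) y = (PySem.Set.contains s y || y == x) := by
  rw [Bool.eq_iff_iff]
  simp [PySem.Set.mem_add, or_comm]

lemma pvF_insert (s : List String) (k m : String)
    (hm : (PySem.Dict.mk pvDiagnosisMapping).get? k = some m) :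
    (pvF s).insert m 1 = pvF (PySem.Set.add s k) := by
  have hkm : (k, m) ∈ pvDiagnosisMapping :=
    PySem.Dict.mem_items_of_get?_eq_some _ hm
  have hc : (pvF s).contains m = true := by
    rw [PySem.Dict.contains_iff_mem_keys]
    simp only [pvF, PySem.Dict.keys, List.map_map, List.mem_map]
    exact ⟨(k, m), hkm, rfl⟩
  have hinj2 : ∀ p ∈ pvDiagnosisMapping, ∀ q ∈ pvDiagnosisMapping, p.2 = q.2 → p = q := by decide
  have hinj1 : ∀ p ∈ pvDiagnosisMapping, ∀ q ∈ pvDiagnosisMapping, p.1 = q.1 → p = q := by decide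
  apply PySem.Dict.ext
  rw [PySem.Dict.items_insert]
  simp only [hc, if_true]
  simp only [pvF, List.map_map]
  refine List.map_congr_left ?_
  intro p hp
  by_cases h2 : p.2 = m
  · have hpk : p = (k, m) := hinj2 p hp (k, m) hkm h2
    simp [hpk]
  · have h1 : p.1 ≠ k := fun hk => h2 (congrArg Prod.snd (hinj1 p hp (k, m) hkm hk))
    simp [Function.comp, h2, h1]

lemma pvF_step (s : List String) (kv : String × Int) :
    (match (PySem.Dict.mk pvDiagnosisMapping).get? kv.1 with
     | some m => if kv.2 ≠ 0 then (pvF s).insert m 1 else pvF s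
     | none => pvF s)
    = pvF (if kv.2 ≠ 0 then PySem.Set.add s kv.1 else s) := by
  by_cases hv : kv.2 ≠ 0
  · rcases hm : (PySem.Dict.mk pvDiagnosisMapping).get? kv.1 with _ | m
    · have hno : ∀ p ∈ pvDiagnosisMapping, p.1 ≠ kv.1 := by
        intro p hp heq
        rw [PySem.Dict.get?_eq_none_iff_not_mem_keys] at hm
        exact hm (heq ▸ PySem.Dict.mem_keys_of_mem_items _ hp)
      dsimp only
      rw [if_pos hv]
      simp only [pvF]
      congr 1
      refine List.map_congr_left ?_
      intro p hp
      rw [pv_contains_add]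
      have hne : (p.1 == kv.1) = false := beq_eq_false_iff_ne.mpr (hno p hp)
      simp [hne]
    · dsimp only
      rw [if_pos hv, if_pos hv, pvF_insert s kv.1 m hm]
  · simp only [not_not] at hv
    rcases hm : (PySem.Dict.mk pvDiagnosisMapping).get? kv.1 with _ | m <;>
      simp [hv]

lemma pvF_fold (ps : List (String × Int)) (s : List String) :
    ps.foldl
      (fun d kv =>
        match (PySem.Dict.mk pvDiagnosisMapping).get? kv.1 with
        | some m => if kv.2 ≠ 0 then d.insert m 1 else d
        | none => d)
      (pvF s)
    = pvF (ps.foldl (fun s kv => if kv.2 ≠ 0 then PySem.Set.add s kv.1 else s) s) := by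
  induction ps generalizing s with
  | nil => rfl
  | cons kv rest ih =>
    rw [List.foldl_cons, List.foldl_cons]
    show List.foldl _ (match (PySem.Dict.mk pvDiagnosisMapping).get? kv.1 with
      | some m => if kv.2 ≠ 0 then (pvF s).insert m 1 else pvF s
      | none => pvF s) rest = _
    rw [pvF_step s kv]
    exact ih _

-- membership in the active-flag set A implicitly accumulates = B's per-key any-scan over the same pairs
lemma pv_contains_fold (ps : List (String × Int)) (s : List String) (x : String) :
    PySem.Set.contains (ps.foldl (fun s kv => if kv.2 ≠ 0 then PySem.Set.add s kv.1 else s) s) x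
      = (PySem.Set.contains s x || ps.any (fun kv => kv.1 == x && kv.2 != 0)) := by
  induction ps generalizing s with
  | nil => simp
  | cons kv rest ih =>
    rw [List.foldl_cons, ih, List.any_cons]
    by_cases hv : kv.2 ≠ 0
    · rw [if_pos hv, pv_contains_add]
      have : (kv.2 != 0) = true := by simpa using hv
      rw [Bool.eq_iff_iff]
      simp [this, BEq.comm (a := x)]
      tauto
    · simp only [not_not] at hv
      simp [hv]

-- B's mapping-driven row, for the set the fold accumulates over the flattened records
lemma pv_final (records : List (List (String × Int))) :
    (pvF (records.flatten.foldl (fun s kv => if kv.2 ≠ 0 then PySem.Set.add s kv.1 else s)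
        PySem.Set.empty)).items
    = pvDiagnosisMapping.map (fun p =>
        (p.2, if records.any (fun diag => diag.any (fun kv => kv.1 == p.1 && kv.2 != 0))
              then (1 : Int) else 0)) := by
  show List.map _ _ = _
  refine List.map_congr_left ?_
  intro p _
  rw [pv_contains_fold, ← List.any_flatten]
  rfl

-- ===== VERDICT (by name: the statement is the Claim_ definition above) =====
theorem fill_diagnosis_spec : Claim_equal_fill_diagnosis := by
  intro data _
  show fill_diagnosis data = fill_diagnosis_alt data
  unfold fill_diagnosis fill_diagnosis_alt
  dsimp only
  rw [← List.foldl_flatten]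
  have hinit : (pvDiagnosisMapping.map (·.2)).foldl
      (fun d k => PySem.Dict.insert d k 0) PySem.Dict.empty = pvF PySem.Set.empty := by decide
  rw [hinit, pvF_fold]
  exact pv_final _
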